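-- pv_equiv track=rewrite | github.com/VishwamAI/Generative-Flex | fix_docstring_patterns_v2.py | fix_module_docstring
-- ===== SOURCE A (Python) =====
-- def fix_module_docstring(content):
--     """Fix module-level docstring formatting."""
--     lines = content.split('\n')
--     fixed_lines = []
--     in_module_docstring = False
--     module_docstring_started = False
--
--     for i, line in enumerate(lines):
--         stripped = line.strip()
--
--         # Handle module docstring start
--         if stripped.startswith('"""') and not module_docstring_started:
--             module_docstring_started = True
--             in_module_docstring = True
--             fixed_lines.append('"""')
--             if stripped != '"""':
--                 content = stripped[3:-3].strip() if stripped.endswith('"""') else stripped[3:].strip()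
--                 fixed_lines.append(f"Module for {content}")
--                 if stripped.endswith('"""'):
--                     fixed_lines.append('"""')
--                     in_module_docstring = False
--             continue
--
--         # Handle module docstring content
--         if in_module_docstring:
--             if stripped.endswith('"""'):
--                 if stripped != '"""':
--                     fixed_lines.append(f"    {stripped[:-3].strip()}")
--                 fixed_lines.append('"""')
--                 in_module_docstring = False
--             elif stripped:
--                 fixed_lines.append(f"    {stripped}")
--             else:
--                 fixed_lines.append('')
--             continue
--
--         fixed_lines.append(line)
--
--     return '\n'.join(fixed_lines)
-- ===== SOURCE B (Python) =====
-- def fix_module_docstring(content):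
--     """Fix module-level docstring formatting (find-the-block decomposition)."""
--     lines = content.split('\n')
--     TQ = '"""'
--     idx = next((k for k, l in enumerate(lines) if l.strip().startswith(TQ)), None)
--     if idx is None:
--         return '\n'.join(lines)
--     s = lines[idx].strip()
--     if s == TQ:
--         opening = [TQ]
--         opened = True
--     else:
--         closed = s.endswith(TQ)
--         inner = (s[3:-3] if closed else s[3:]).strip()
--         opening = [TQ, f"Module for {inner}"] + ([TQ] if closed else [])
--         opened = not closed
--     rest = lines[idx + 1:]
--     if opened:
--         tail = []
--         for j, raw in enumerate(rest):
--             t = raw.strip()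
--             if t.endswith(TQ):
--                 if t != TQ:
--                     tail.append('    ' + t[:-3].strip())
--                 tail.append(TQ)
--                 tail.extend(rest[j + 1:])
--                 break
--             tail.append('    ' + t if t else '')
--     else:
--         tail = rest
--     return '\n'.join(lines[:idx] + opening + tail)
-- ===== Notes on version B (the rewrite author's own statement) =====
-- stated objective: alternative
-- what changed: Replaces A's single flag-driven loop (in_docstring/started booleans threaded through every line) with a three-phase decomposition: find the index of the first triple-quote opening line, emit the prefix unchanged, rewrite the opening and walk the block to its closing line, then pass the remainder through untouched.
import Mathlib
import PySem

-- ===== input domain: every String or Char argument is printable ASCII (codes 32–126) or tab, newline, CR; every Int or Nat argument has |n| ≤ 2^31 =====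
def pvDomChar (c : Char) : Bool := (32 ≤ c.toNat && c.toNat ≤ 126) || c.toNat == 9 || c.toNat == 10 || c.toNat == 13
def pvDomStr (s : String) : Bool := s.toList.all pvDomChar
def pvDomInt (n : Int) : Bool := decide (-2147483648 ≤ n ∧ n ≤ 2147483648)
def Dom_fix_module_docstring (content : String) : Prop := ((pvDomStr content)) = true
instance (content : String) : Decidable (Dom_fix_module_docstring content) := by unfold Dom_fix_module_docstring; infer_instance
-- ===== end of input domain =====

-- B changes the decomposition (scan-for-opening + explicit block walk instead of a flag-driven single loop); objective: alternative/simpler, not faster.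

-- ===== PORT A =====
-- state: (fixed_lines, in_module_docstring, module_docstring_started)
def pvStepA (st : List String × Bool × Bool) (line : String) : List String × Bool × Bool :=
  let fixed := st.1
  let inds := st.2.1
  let started := st.2.2
  let stripped := PySem.Str.strip line
  if PySem.Str.startswith stripped "\"\"\"" && !started then
    let fixed := fixed ++ ["\"\"\""]
    if stripped = "\"\"\"" then (fixed, true, true)
    else
      let c := if PySem.Str.endswith stripped "\"\"\"" then
          PySem.Str.strip (PySem.Str.slice stripped (some 3) (some (-3)))
        else PySem.Str.strip (PySem.Str.slice stripped (some 3) none)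
      let fixed := fixed ++ ["Module for " ++ c]
      if PySem.Str.endswith stripped "\"\"\"" then (fixed ++ ["\"\"\""], false, true)
      else (fixed, true, true)
  else if inds then
    if PySem.Str.endswith stripped "\"\"\"" then
      let fixed := if stripped = "\"\"\"" then fixed
        else fixed ++ ["    " ++ PySem.Str.strip (PySem.Str.slice stripped none (some (-3)))]
      (fixed ++ ["\"\"\""], false, started)
    else if stripped ≠ "" then (fixed ++ ["    " ++ stripped], inds, started)
    else (fixed ++ [""], inds, started)
  else (fixed ++ [line], inds, started)

def fix_module_docstring (content : String) : String :=
  let lines := (PySem.Str.split? content "\n").getD []  -- sep ≠ "", so split? is always some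
  PySem.Str.join "\n" (lines.foldl pvStepA ([], false, false)).1

-- ===== PORT B =====
-- walk the open docstring block: reformat interior lines until the closing line, then pass the rest through
def pvCloseB : List String → List String
  | [] => []
  | l :: ls =>
    let t := PySem.Str.strip l
    if PySem.Str.endswith t "\"\"\"" then
      (if t = "\"\"\"" then [] else ["    " ++ PySem.Str.strip (PySem.Str.slice t none (some (-3)))])
        ++ "\"\"\"" :: ls
    else if t ≠ "" then ("    " ++ t) :: pvCloseB ls
    else "" :: pvCloseB ls

def fix_module_docstring_alt (content : String) : String :=
  let lines := (PySem.Str.split? content "\n").getD []  -- sep ≠ "", so split? is always some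
  match lines.findIdx? (fun l => PySem.Str.startswith (PySem.Str.strip l) "\"\"\"") with
  | none => PySem.Str.join "\n" lines
  | some i =>
    let s := PySem.Str.strip (lines.getD i "")
    let rest := lines.drop (i + 1)
    let opening :=
      if s = "\"\"\"" then ["\"\"\""]
      else
        let closed := PySem.Str.endswith s "\"\"\""
        let inner := if closed then PySem.Str.strip (PySem.Str.slice s (some 3) (some (-3)))
          else PySem.Str.strip (PySem.Str.slice s (some 3) none)
        ["\"\"\"", "Module for " ++ inner] ++ (if closed then ["\"\"\""] else [])
    let opened := s = "\"\"\"" || !PySem.Str.endswith s "\"\"\""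
    let tail := if opened then pvCloseB rest else rest
    PySem.Str.join "\n" (lines.take i ++ opening ++ tail)

-- ===== PRECONDITION & SPEC =====
def Spec_fix_module_docstring (content : String) (out : String) : Prop := out = fix_module_docstring_alt content
instance (content : String) (out : String) : Decidable (Spec_fix_module_docstring content out) := by unfold Spec_fix_module_docstring; infer_instance

-- ===== CLAIM (what is proved, stated in full; the proofs are below) =====
def Claim_equal_fix_module_docstring : Prop := ∀ (content : String), Dom_fix_module_docstring content → Spec_fix_module_docstring content (fix_module_docstring content)

-- ===== LEMMAS AND PROOFS =====

theorem pvStepA_acc (acc : List String) (b s : Bool) (l : String) :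
    pvStepA (acc, b, s) l = (acc ++ (pvStepA ([], b, s) l).1, (pvStepA ([], b, s) l).2) := by
  simp only [pvStepA]
  split_ifs <;> simp

theorem pvFoldA_acc (ls : List String) (acc : List String) (b s : Bool) :
    ls.foldl pvStepA (acc, b, s)
      = (acc ++ (ls.foldl pvStepA ([], b, s)).1, (ls.foldl pvStepA ([], b, s)).2) := by
  induction ls generalizing acc b s with
  | nil => simp
  | cons l ls ih =>
    simp only [List.foldl_cons]
    rw [pvStepA_acc]
    obtain ⟨f, b', s'⟩ := pvStepA ([], b, s) l
    rw [ih (acc ++ f) b' s', ih f b' s']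
    simp

theorem pvFoldA_done (ls : List String) (acc : List String) :
    (ls.foldl pvStepA (acc, false, true)).1 = acc ++ ls := by
  induction ls generalizing acc with
  | nil => simp
  | cons l ls ih =>
    simp only [List.foldl_cons]
    have h : pvStepA (acc, false, true) l = (acc ++ [l], false, true) := by
      simp only [pvStepA, Bool.not_true, Bool.and_false, Bool.false_eq_true, reduceIte]
    rw [h, ih]
    simp

theorem pvStartsSelf : PySem.Str.startswith ("\"\"\"" : String) "\"\"\"" = true := by decide

theorem pvEndsEmpty : PySem.Str.endswith ("" : String) "\"\"\"" = false := by decide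

theorem pvEndsSelf : PySem.Str.endswith ("\"\"\"" : String) "\"\"\"" = true := by decide

theorem pvFoldA_open (ls : List String) (acc : List String) :
    (ls.foldl pvStepA (acc, true, true)).1 = acc ++ pvCloseB ls := by
  induction ls generalizing acc with
  | nil => simp [pvCloseB]
  | cons l ls ih =>
    simp only [List.foldl_cons, pvCloseB]
    by_cases he : PySem.Str.endswith (PySem.Str.strip l) "\"\"\"" = true
    · by_cases hq : PySem.Str.strip l = "\"\"\""
      · have h : pvStepA (acc, true, true) l = (acc ++ ["\"\"\""], false, true) := by
          simp only [pvStepA, Bool.not_true, Bool.and_false, Bool.false_eq_true, reduceIte,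
            he, hq, pvEndsSelf, if_true]
        rw [h, pvFoldA_done]
        simp only [he, hq, pvEndsSelf, if_true, reduceIte]
        simp
      · have h : pvStepA (acc, true, true) l
            = (acc ++ ["    " ++ PySem.Str.strip (PySem.Str.slice (PySem.Str.strip l) none (some (-3))),
                "\"\"\""], false, true) := by
          simp only [pvStepA, Bool.not_true, Bool.and_false, Bool.false_eq_true, reduceIte,
            he, hq, if_true]
          simp
        rw [h, pvFoldA_done]
        simp only [he, hq, if_true, reduceIte]
        simp
    · by_cases hn : PySem.Str.strip l = ""
      · have h : pvStepA (acc, true, true) l = (acc ++ [""], true, true) := by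
          simp only [pvStepA, Bool.not_true, Bool.and_false, Bool.false_eq_true, reduceIte,
            hn, pvEndsEmpty, ne_eq, not_true_eq_false, if_false]
        rw [h, ih]
        simp only [hn, pvEndsEmpty, ne_eq, not_true_eq_false, reduceIte]
        simp
      · have h : pvStepA (acc, true, true) l = (acc ++ ["    " ++ PySem.Str.strip l], true, true) := by
          simp only [pvStepA, Bool.not_true, Bool.and_false, Bool.false_eq_true, reduceIte,
            he, hn, ne_eq, not_false_eq_true, if_true]
        rw [h, ih]
        simp only [he, hn, ne_eq, not_false_eq_true, reduceIte]
        simp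

theorem pvMain (lines : List String) :
    (lines.foldl pvStepA ([], false, false)).1
      = match lines.findIdx? (fun l => PySem.Str.startswith (PySem.Str.strip l) "\"\"\"") with
        | none => lines
        | some i =>
          let s := PySem.Str.strip (lines.getD i "")
          let rest := lines.drop (i + 1)
          let opening :=
            if s = "\"\"\"" then ["\"\"\""]
            else
              let closed := PySem.Str.endswith s "\"\"\""
              let inner := if closed then PySem.Str.strip (PySem.Str.slice s (some 3) (some (-3)))
                else PySem.Str.strip (PySem.Str.slice s (some 3) none)
              ["\"\"\"", "Module for " ++ inner] ++ (if closed then ["\"\"\""] else [])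
          let opened := s = "\"\"\"" || !PySem.Str.endswith s "\"\"\""
          let tail := if opened then pvCloseB rest else rest
          lines.take i ++ opening ++ tail := by
  induction lines with
  | nil => simp
  | cons l ls ih =>
    by_cases hs : PySem.Str.startswith (PySem.Str.strip l) "\"\"\"" = true
    · simp only [List.findIdx?_cons, hs, cond_true, List.foldl_cons]
      by_cases hq : PySem.Str.strip l = "\"\"\""
      · have h : pvStepA ([], false, false) l = (["\"\"\""], true, true) := by
          simp only [pvStepA, hs, Bool.not_false, Bool.and_true, if_true, hq, pvStartsSelf,
            reduceIte, List.nil_append]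
        rw [h, pvFoldA_open]
        simp only [hq, List.getD_cons_zero, List.drop_succ_cons, List.drop_zero,
          List.take_zero, reduceIte]
        simp
      · by_cases he : PySem.Str.endswith (PySem.Str.strip l) "\"\"\"" = true
        · have h : pvStepA ([], false, false) l
              = (["\"\"\"",
                  "Module for " ++ PySem.Str.strip (PySem.Str.slice (PySem.Str.strip l) (some 3) (some (-3))),
                  "\"\"\""], false, true) := by
            simp only [pvStepA, hs, Bool.not_false, Bool.and_true, if_true, hq, he, reduceIte,
              List.nil_append, List.singleton_append, List.cons_append]
          rw [h, pvFoldA_done]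
          simp only [hq, he, List.getD_cons_zero, List.drop_succ_cons, List.drop_zero,
            List.take_zero, Bool.not_true, Bool.or_false, reduceIte, decide_eq_true_eq]
          simp [hq]
        · have h : pvStepA ([], false, false) l
              = (["\"\"\"",
                  "Module for " ++ PySem.Str.strip (PySem.Str.slice (PySem.Str.strip l) (some 3) none)],
                 true, true) := by
            simp only [pvStepA, hs, Bool.not_false, Bool.and_true, if_true, hq, he, reduceIte,
              Bool.false_eq_true, if_false, List.nil_append, List.singleton_append,
              List.cons_append]
          rw [h, pvFoldA_open]
          simp only [hq, he, List.getD_cons_zero, List.drop_succ_cons, List.drop_zero,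
            List.take_zero, Bool.not_false, Bool.or_true, reduceIte, Bool.false_eq_true, if_false]
          simp [hq, he]
    · simp only [List.findIdx?_cons, hs, cond_false, List.foldl_cons, Bool.false_eq_true]
      have h : pvStepA ([], false, false) l = ([l], false, false) := by
        simp only [pvStepA, hs, Bool.false_and, Bool.false_eq_true, reduceIte, List.nil_append]
      rw [h, pvFoldA_acc ls [l] false false]
      cases hf : ls.findIdx? (fun l => PySem.Str.startswith (PySem.Str.strip l) "\"\"\"") with
      | none =>
        simp only [hf] at ih
        simp only [Option.map_none, hf]
        simp [ih]
      | some i =>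
        simp only [hf] at ih
        simp only [Option.map_some, hf]
        simp only [List.getD_cons_succ, List.drop_succ_cons, List.take_succ_cons]
        simp [ih]

-- ===== VERDICT (by name: the statement is the Claim_ definition above) =====
theorem fix_module_docstring_spec : Claim_equal_fix_module_docstring := by
  intro content _
  show fix_module_docstring content = fix_module_docstring_alt content
  show PySem.Str.join "\n"
      (List.foldl pvStepA ([], false, false) ((PySem.Str.split? content "\n").getD [])).1
    = fix_module_docstring_alt content
  rw [pvMain]
  unfold fix_module_docstring_alt
  cases hf : ((PySem.Str.split? content "\n").getD []).findIdx?
      (fun l => PySem.Str.startswith (PySem.Str.strip l) "\"\"\"") <;>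
    simp only [hf]
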